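-- pv_equiv track=rewrite | github.com/srinathalla/python | algo/dfs/zumaGame.py | findMinStep
-- ===== SOURCE A (Python) =====
-- from collections import Counter
--
-- def findMinStep(board: str, hand: str) -> int:
--
--     def delete(board):
--         i = 0
--         for j in range(len(board)):
--             if board[i] == board[j]:
--                 continue
--             if j - i >= 3:
--                 return delete(board[:i] + board[j:])
--             i = j
--
--         return board
--
--     def dfs(board, c):
--
--         board = delete(board)
--         if board == "#":
--             return 0
--         mc = 6
--         i = 0
--         for j in range(len(board)):
--             if board[i] == board[j]:
--                 continue
--             need = 3 - (j - i)
--             if c[board[i]] >= need: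
--                 c[board[i]] -= need
--                 mc = min(mc, need + dfs(board[:i] + board[j:], c))
--                 c[board[i]] += need
--             i = j
--
--         return mc
--
--     c = Counter(hand)
--     res = dfs(board + '#', c)
--     return -1 if res == 6 else res
-- ===== SOURCE B (Python) =====
-- from collections import Counter
--
-- def findMinStep(board: str, hand: str) -> int:
--     # B: run-length-encoded reformulation. delete's recursive rescanning is replaced
--     # by a single-pass stack collapse over (char, count) groups, and dfs walks the
--     # group list instead of scanning characters by index.
--
--     def collapse(s):
--         st = []
--         for ch in s:
--             if st and st[-1][0] == ch:
--                 st[-1] = (ch, st[-1][1] + 1)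
--             else:
--                 if st and st[-1][1] >= 3:
--                     st.pop()
--                 if st and st[-1][0] == ch:
--                     st[-1] = (ch, st[-1][1] + 1)
--                 else:
--                     st.append((ch, 1))
--         return st
--
--     def dfs(s, c):
--         st = collapse(s)
--         if st == [('#', 1)]:
--             return 0
--         mc = 6
--         done = []
--         todo = st
--         while len(todo) > 1:
--             ch, k = todo[0]
--             rest = todo[1:]
--             need = 3 - k
--             if c[ch] >= need:
--                 c[ch] -= need
--                 nxt = ''.join(g * n for g, n in done + rest)
--                 mc = min(mc, need + dfs(nxt, c))
--                 c[ch] += need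
--             done = done + [(ch, k)]
--             todo = rest
--         return mc
--
--     res = dfs(board + '#', Counter(hand))
--     return -1 if res == 6 else res
-- ===== Notes on version B (the rewrite author's own statement) =====
-- stated objective: alternative
-- what changed: delete's recursive leftmost rescanning is replaced by a single-pass stack collapse over (char,count) run-length groups (correct by confluence of the collapse), and dfs iterates over that group list instead of re-scanning the board character by character.
import Mathlib
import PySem

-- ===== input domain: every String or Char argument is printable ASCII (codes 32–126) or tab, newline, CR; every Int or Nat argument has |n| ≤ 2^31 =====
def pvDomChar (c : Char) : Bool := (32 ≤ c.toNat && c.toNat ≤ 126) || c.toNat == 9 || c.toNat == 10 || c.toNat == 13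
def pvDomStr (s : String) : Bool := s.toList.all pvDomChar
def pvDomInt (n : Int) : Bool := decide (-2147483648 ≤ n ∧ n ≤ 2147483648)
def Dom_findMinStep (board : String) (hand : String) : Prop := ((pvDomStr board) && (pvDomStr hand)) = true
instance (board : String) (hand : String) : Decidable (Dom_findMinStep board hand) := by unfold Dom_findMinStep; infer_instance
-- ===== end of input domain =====

-- B replaces delete's recursive rescanning by a single-pass stack collapse over
-- (char,count) groups and walks the group list in dfs (objective: alternative algorithm).
-- Both dfs recursions are realised with a fuel parameter (s.length + 1, always sufficient
-- since every nested call strictly shortens the board); the fuel is a totality device only.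

-- ===== PORT A =====
-- board[i] for an index that A's scan keeps in range (0 ≤ i < len); exact there.
def pvGetA (s : List Char) (i : Nat) : Char := s.getD i ' '

-- A's `delete`: i = start of current run, j scans; on a closed run of length ≥ 3 restart
-- on board[:i] + board[j:].
def delAuxA (s : List Char) (i j : Nat) : List Char :=
  if h : j < s.length then
    if pvGetA s i = pvGetA s j then delAuxA s i (j + 1)
    else if 3 ≤ j - i then delAuxA (s.take i ++ s.drop j) 0 0
    else delAuxA s j (j + 1)
  else s
termination_by (s.length, s.length - j)
decreasing_by
  · apply Prod.Lex.right; omega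
  · apply Prod.Lex.left; simp only [List.length_append, List.length_take, List.length_drop]; omega
  · apply Prod.Lex.right; omega

-- A's dfs. The Counter mutation `c[x] -= need` … recursive call … `c[x] += need` is pure
-- restore-after-use; the port passes the decremented dict into the call and continues with
-- the original (value-identical to Python's restored Counter, which is only read via getD).
mutual
def dfsA : Nat → List Char → PySem.Dict Char Int → Int
  | 0, _, _ => 0
  | f + 1, s, c =>
    let b := delAuxA s 0 0
    if b = ['#'] then 0 else dfsLoopA f b 0 0 c 6
  termination_by f s c => (f, 0, 0)
def dfsLoopA (f : Nat) (b : List Char) (i j : Nat) (c : PySem.Dict Char Int) (mc : Int) : Int :=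
  if h : j < b.length then
    if pvGetA b i = pvGetA b j then dfsLoopA f b i (j + 1) c mc
    else
      let need : Int := 3 - ((j : Int) - (i : Int))
      if need ≤ c.getD (pvGetA b i) 0 then
        let c' := c.insert (pvGetA b i) (c.getD (pvGetA b i) 0 - need)
        let mc' := min mc (need + dfsA f (b.take i ++ b.drop j) c')
        dfsLoopA f b j (j + 1) c mc'
      else dfsLoopA f b j (j + 1) c mc
  else mc
  termination_by (f, 1, b.length - j)
end

def findMinStep (board : String) (hand : String) : Int :=
  let s := board.toList ++ ['#']
  let res := dfsA (s.length + 1) s (PySem.Dict.counter hand.toList)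
  if res = 6 then -1 else res

-- ===== PORT B =====
-- One step of B's stack collapse (stack top at the END of the list, as in Source B).
def stepB (st : List (Char × Nat)) (ch : Char) : List (Char × Nat) :=
  match st.getLast? with
  | some (d, k) =>
    if d = ch then st.dropLast ++ [(ch, k + 1)]
    else
      let st1 := if 3 ≤ k then st.dropLast else st
      match st1.getLast? with
      | some (e, m) => if e = ch then st1.dropLast ++ [(ch, m + 1)] else st1 ++ [(ch, 1)]
      | none => st1 ++ [(ch, 1)]
  | none => st ++ [(ch, 1)]

def collapseB (s : List Char) : List (Char × Nat) := s.foldl stepB []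

-- ''.join(g * n for g, n in gs)
def fromGroups (gs : List (Char × Nat)) : List Char := gs.flatMap (fun g => List.replicate g.2 g.1)

mutual
def dfsB : Nat → List Char → PySem.Dict Char Int → Int
  | 0, _, _ => 0
  | f + 1, s, c =>
    let st := collapseB s
    if st = [('#', 1)] then 0 else dfsLoopB f [] st c 6
  termination_by f s c => (f, 0, 0)
def dfsLoopB (f : Nat) (done todo : List (Char × Nat)) (c : PySem.Dict Char Int) (mc : Int) :
    Int :=
  match todo with
  | [] => mc
  | [_] => mc
  | (ch, k) :: rest =>
    let need : Int := 3 - (k : Int)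
    if need ≤ c.getD ch 0 then
      let c' := c.insert ch (c.getD ch 0 - need)
      let mc' := min mc (need + dfsB f (fromGroups (done ++ rest)) c')
      dfsLoopB f (done ++ [(ch, k)]) rest c mc'
    else dfsLoopB f (done ++ [(ch, k)]) rest c mc
  termination_by (f, 1, todo.length)
end

def findMinStep_alt (board : String) (hand : String) : Int :=
  let s := board.toList ++ ['#']
  let res := dfsB (s.length + 1) s (PySem.Dict.counter hand.toList)
  if res = 6 then -1 else res

-- ===== PRECONDITION & SPEC =====
def Spec_findMinStep (board : String) (hand : String) (out : Int) : Prop := out = findMinStep_alt board hand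
instance (board : String) (hand : String) (out : Int) : Decidable (Spec_findMinStep board hand out) := by unfold Spec_findMinStep; infer_instance

-- ===== CLAIM (what is proved, stated in full; the proofs are below) =====
def Claim_equal_findMinStep : Prop := ∀ (board : String) (hand : String), Dom_findMinStep board hand → Spec_findMinStep board hand (findMinStep board hand)

-- ===== LEMMAS AND PROOFS =====

-- run-length groups, used only by the proofs
def toGroups : List Char → List (Char × Nat)
  | [] => []
  | c :: cs =>
    match toGroups cs with
    | [] => [(c, 1)]
    | (d, k) :: gs => if c = d then (c, k + 1) :: gs else (c, 1) :: (d, k) :: gs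

def gCounts (gs : List (Char × Nat)) : Prop := ∀ g ∈ gs, 1 ≤ g.2

def gAdj (gs : List (Char × Nat)) : Prop := List.IsChain (fun a b => a.1 ≠ b.1) gs

-- "all non-last groups have count < 3" (no closed run of length ≥ 3)
def NLS : List (Char × Nat) → Prop
  | [] => True
  | [_] => True
  | g :: h :: t => g.2 < 3 ∧ NLS (h :: t)

-- ---- basic group lemmas ----
theorem fromGroups_nil : fromGroups [] = [] := rfl

theorem fromGroups_cons (c : Char) (k : Nat) (gs : List (Char × Nat)) :
    fromGroups ((c, k) :: gs) = List.replicate k c ++ fromGroups gs := rfl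

theorem fromGroups_append (a b : List (Char × Nat)) :
    fromGroups (a ++ b) = fromGroups a ++ fromGroups b := List.flatMap_append

-- ---- stepB behaviour on an explicit stack ----
theorem stepB_nil (c : Char) : stepB [] c = [(c, 1)] := rfl

theorem stepB_merge (st : List (Char × Nat)) (c : Char) (k : Nat) :
    stepB (st ++ [(c, k)]) c = st ++ [(c, k + 1)] := by
  simp [stepB]

theorem stepB_push (st : List (Char × Nat)) (c : Char) (k : Nat) (d : Char)
    (hne : c ≠ d) (hk : k < 3) :
    stepB (st ++ [(c, k)]) d = (st ++ [(c, k)]) ++ [(d, 1)] := by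
  simp [stepB, hne, Nat.not_le.mpr hk]

theorem stepB_pop (st : List (Char × Nat)) (c : Char) (k : Nat) (d : Char)
    (hne : c ≠ d) (hk : 3 ≤ k)
    (hlt : ∀ e m, st.getLast? = some (e, m) → m < 3) :
    stepB (st ++ [(c, k)]) d = stepB st d := by
  rcases List.eq_nil_or_concat st with h | ⟨st', ⟨e, m⟩, h⟩
  · subst h; simp [stepB, hne, hk]
  · subst h
    simp only [List.concat_eq_append]
    have hm : m < 3 := hlt e m (by simp)
    by_cases hed : e = d
    · subst hed; simp [stepB, hne, hk, Nat.not_le.mpr hm]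
    · simp [stepB, hne, hk, hed, Nat.not_le.mpr hm]

-- the top of the stack blocks neither a push of c nor is it popped: count < 3, char ≠ c
def TopOK (st : List (Char × Nat)) (c : Char) : Prop :=
  ∀ e m, st.getLast? = some (e, m) → m < 3 ∧ e ≠ c

theorem stepB_push' (st : List (Char × Nat)) (c : Char) (h : TopOK st c) :
    stepB st c = st ++ [(c, 1)] := by
  rcases List.eq_nil_or_concat st with hn | ⟨st', ⟨e, m⟩, hc⟩
  · subst hn; rfl
  · subst hc
    simp only [List.concat_eq_append]
    obtain ⟨hm, hne⟩ := h e m (by simp)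
    exact stepB_push st' e m c hne hm

theorem foldl_step_replicate (r : Nat) (st : List (Char × Nat)) (c : Char) (k : Nat) :
    List.foldl stepB (st ++ [(c, k)]) (List.replicate r c) = st ++ [(c, k + r)] := by
  induction r generalizing k with
  | zero => rfl
  | succ r ih =>
    rw [List.replicate_succ, List.foldl_cons, stepB_merge]
    rw [ih (k + 1)]
    ring_nf

theorem foldl_step_groups (gs : List (Char × Nat)) :
    ∀ st, gCounts gs → gAdj gs → NLS gs →
    (∀ c k, gs.head? = some (c, k) → TopOK st c) →
    List.foldl stepB st (fromGroups gs) = st ++ gs := by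
  induction gs with
  | nil => intro st _ _ _ _; simp [fromGroups]
  | cons g gs ih =>
    intro st hc ha hn ht
    obtain ⟨c, k⟩ := g
    have hk1 : 1 ≤ k := hc (c, k) (by simp)
    rw [fromGroups_cons]
    have hrep : List.replicate k c = c :: List.replicate (k - 1) c := by
      rw [← List.replicate_succ]; congr 1; omega
    rw [hrep, List.foldl_append, List.foldl_cons,
      stepB_push' st c (ht c k rfl), foldl_step_replicate]
    have hk' : 1 + (k - 1) = k := by omega
    rw [hk']
    have := ih (st ++ [(c, k)]) (fun g hg => hc g (by simp [hg]))
      (ha.tail) ?nls ?topok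
    · rw [this]; simp
    case nls =>
      cases gs with
      | nil => trivial
      | cons h t => exact hn.2
    case topok =>
      intro c' k' hhd
      intro e m hlast
      simp at hlast
      obtain ⟨he, hm⟩ := hlast
      subst he; subst hm
      cases gs with
      | nil => simp at hhd
      | cons g2 t =>
        have hg2 : g2 = (c', k') := by simpa using hhd
        refine ⟨hn.1, ?_⟩
        have hrel := (List.isChain_cons_cons.mp ha).1
        rw [hg2] at hrel
        simpa using hrel

-- ---- toGroups: the run-length encoding of a string ----
theorem fromGroups_toGroups : ∀ s : List Char, fromGroups (toGroups s) = s := by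
  intro s
  induction s with
  | nil => rfl
  | cons c cs ih =>
    rw [toGroups]
    cases h : toGroups cs with
    | nil =>
      have : cs = [] := by rw [h] at ih; simpa [fromGroups] using ih.symm
      subst this; rfl
    | cons g gs =>
      obtain ⟨d, k⟩ := g
      rw [h] at ih
      by_cases hcd : c = d
      · subst hcd
        simp only [if_pos rfl, if_true, fromGroups_cons, List.replicate_succ, List.cons_append]
        rw [← fromGroups_cons, ih]
      · simp only [if_neg hcd, fromGroups_cons, List.replicate_one, List.cons_append,
          List.nil_append]
        rw [← fromGroups_cons, ih]

theorem gCounts_toGroups : ∀ s : List Char, gCounts (toGroups s) := by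
  intro s
  induction s with
  | nil => intro g hg; simp [toGroups] at hg
  | cons c cs ih =>
    rw [toGroups]
    cases h : toGroups cs with
    | nil => intro g hg; simp at hg; subst hg; simp
    | cons g0 gs =>
      obtain ⟨d, k⟩ := g0
      rw [h] at ih
      by_cases hcd : c = d
      · subst hcd
        simp only [if_pos rfl, if_true]
        intro g hg
        rcases List.mem_cons.mp hg with rfl | hg
        · simp
        · exact ih g (List.mem_cons_of_mem _ hg)
      · simp only [if_neg hcd]
        intro g hg
        rcases List.mem_cons.mp hg with rfl | hg
        · simp
        · exact ih g hg

theorem gAdj_toGroups : ∀ s : List Char, gAdj (toGroups s) := by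
  intro s
  induction s with
  | nil => exact List.IsChain.nil
  | cons c cs ih =>
    rw [toGroups]
    cases h : toGroups cs with
    | nil => simp [gAdj]
    | cons g0 gs =>
      obtain ⟨d, k⟩ := g0
      rw [h] at ih
      by_cases hcd : c = d
      · subst hcd
        simp only [if_pos rfl, if_true]
        unfold gAdj at ih ⊢
        cases gs with
        | nil => simp
        | cons g1 t =>
          rw [List.isChain_cons_cons] at ih ⊢
          exact ⟨ih.1, ih.2⟩
      · simp only [if_neg hcd]
        unfold gAdj at ih ⊢
        rw [List.isChain_cons_cons]
        exact ⟨hcd, ih⟩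

theorem NLS_of_short : ∀ gs : List (Char × Nat), (∀ g ∈ gs, g.2 < 3) → NLS gs := by
  intro gs
  induction gs with
  | nil => intro _; trivial
  | cons g t ih =>
    intro h
    cases t with
    | nil => trivial
    | cons g2 t2 =>
      exact ⟨h g (by simp), ih (fun g hg => h g (List.mem_cons_of_mem _ hg))⟩

-- either no closed run has length ≥ 3, or there is a first group of count ≥ 3 that is
-- not the last group
theorem findTrigger : ∀ gs : List (Char × Nat),
    NLS gs ∨ ∃ pre c k suf, gs = pre ++ (c, k) :: suf ∧ suf ≠ [] ∧ 3 ≤ k ∧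
      (∀ g ∈ pre, g.2 < 3) := by
  intro gs
  induction gs with
  | nil => left; trivial
  | cons g t ih =>
    cases t with
    | nil => left; trivial
    | cons g2 t2 =>
      obtain ⟨c, k⟩ := g
      by_cases hk : 3 ≤ k
      · right; exact ⟨[], c, k, g2 :: t2, rfl, by simp, hk, by simp⟩
      · rcases ih with hnls | ⟨pre, c', k', suf, heq, hsuf, hk', hpre⟩
        · left; exact ⟨by omega, hnls⟩
        · right
          refine ⟨(c, k) :: pre, c', k', suf, by rw [heq]; rfl, hsuf, hk', ?_⟩
          intro g hg
          rcases List.mem_cons.mp hg with rfl | hg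
          · simpa using hk
          · exact hpre g hg

-- ---- the collapse stack is always a well-formed group list ----
theorem stepB_pop_nil (d : Char) (k : Nat) (c : Char) (hdc : d ≠ c) (hk : 3 ≤ k) :
    stepB [(d, k)] c = [(c, 1)] := by
  simp [stepB, hdc, hk]

theorem stepB_pop_merge (st : List (Char × Nat)) (e : Char) (m : Nat) (d : Char) (k : Nat)
    (c : Char) (hdc : d ≠ c) (hk : 3 ≤ k) (hec : e = c) :
    stepB ((st ++ [(e, m)]) ++ [(d, k)]) c = st ++ [(c, m + 1)] := by
  subst hec
  simp [stepB, hdc, hk]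

theorem stepB_pop_push (st : List (Char × Nat)) (e : Char) (m : Nat) (d : Char) (k : Nat)
    (c : Char) (hdc : d ≠ c) (hk : 3 ≤ k) (hec : e ≠ c) :
    stepB ((st ++ [(e, m)]) ++ [(d, k)]) c = (st ++ [(e, m)]) ++ [(c, 1)] := by
  simp [stepB, hdc, hk, hec]

-- well-formedness helpers
theorem wf_of_append_left (a b : List (Char × Nat)) (hc : gCounts (a ++ b))
    (ha : gAdj (a ++ b)) : gCounts a ∧ gAdj a := by
  constructor
  · intro g hg; exact hc g (by simp [hg])
  · exact (List.isChain_append.mp ha).1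

theorem wf_set_last (st : List (Char × Nat)) (d : Char) (k k' : Nat)
    (hc : gCounts (st ++ [(d, k)])) (ha : gAdj (st ++ [(d, k)])) (hk' : 1 ≤ k') :
    gCounts (st ++ [(d, k')]) ∧ gAdj (st ++ [(d, k')]) := by
  constructor
  · intro g hg
    rcases List.mem_append.mp hg with hg | hg
    · exact hc g (by simp [hg])
    · simp at hg; subst hg; exact hk'
  · rcases List.isChain_append.mp ha with ⟨h1, h2, h3⟩
    exact List.isChain_append.mpr ⟨h1, by simp, by simpa using h3⟩

theorem wf_push_last (st : List (Char × Nat)) (c : Char)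
    (hc : gCounts st) (ha : gAdj st)
    (hne : ∀ e m, st.getLast? = some (e, m) → e ≠ c) :
    gCounts (st ++ [(c, 1)]) ∧ gAdj (st ++ [(c, 1)]) := by
  constructor
  · intro g hg
    rcases List.mem_append.mp hg with hg | hg
    · exact hc g hg
    · simp at hg; subst hg; exact le_refl 1
  · refine List.isChain_append.mpr ⟨ha, by simp, ?_⟩
    intro x hx y hy
    simp at hy; subst hy
    obtain ⟨e, m⟩ := x
    exact hne e m hx

theorem step_wf (st : List (Char × Nat)) (c : Char) (hc : gCounts st) (ha : gAdj st) :
    gCounts (stepB st c) ∧ gAdj (stepB st c) := by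
  rcases List.eq_nil_or_concat st with rfl | ⟨st', ⟨d, k⟩, rfl⟩
  · rw [stepB_nil]
    exact ⟨by intro g hg; simp at hg; subst hg; exact le_refl 1, by simp [gAdj]⟩
  · simp only [List.concat_eq_append] at hc ha ⊢
    by_cases hdc : d = c
    · subst hdc
      rw [stepB_merge]
      exact wf_set_last st' d k (k + 1) hc ha (by omega)
    · by_cases hk : 3 ≤ k
      · -- pop, then merge or push onto st'
        obtain ⟨hc', ha'⟩ := wf_of_append_left st' [(d, k)] hc ha
        rcases List.eq_nil_or_concat st' with rfl | ⟨st'', ⟨e, m⟩, rfl⟩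
        · rw [show ([] : List (Char × Nat)) ++ [(d, k)] = [(d, k)] by rfl,
            stepB_pop_nil d k c hdc hk]
          exact ⟨by intro g hg; simp at hg; subst hg; exact le_refl 1, by simp [gAdj]⟩
        · simp only [List.concat_eq_append] at hc' ha' ⊢
          by_cases hec : e = c
          · subst hec
            rw [stepB_pop_merge st'' e m d k e hdc hk rfl]
            exact wf_set_last st'' e m (m + 1) hc' ha' (by omega)
          · rw [stepB_pop_push st'' e m d k c hdc hk hec]
            refine wf_push_last _ c hc' ha' ?_
            intro e' m' hl
            simp at hl
            obtain ⟨rfl, -⟩ := hl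
            exact hec
      · rw [stepB_push st' d k c hdc (by omega)]
        refine wf_push_last _ c hc ha ?_
        intro e' m' hl
        simp at hl
        obtain ⟨rfl, -⟩ := hl
        exact hdc

theorem wf_collapse_aux (l : List Char) : ∀ st, gCounts st → gAdj st →
    gCounts (List.foldl stepB st l) ∧ gAdj (List.foldl stepB st l) := by
  induction l with
  | nil => intro st hc ha; exact ⟨hc, ha⟩
  | cons x l ih =>
    intro st hc ha
    obtain ⟨hc', ha'⟩ := step_wf st x hc ha
    exact ih (stepB st x) hc' ha'

theorem wf_collapse (s : List Char) : gCounts (collapseB s) ∧ gAdj (collapseB s) := by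
  exact wf_collapse_aux s [] (by intro g hg; simp at hg) (by simp [gAdj])

-- board == "#" test transfers to the group list
theorem fromGroups_eq_nil (gs : List (Char × Nat)) (hc : gCounts gs)
    (h : fromGroups gs = []) : gs = [] := by
  cases gs with
  | nil => rfl
  | cons g t =>
    obtain ⟨c, k⟩ := g
    have hk := hc (c, k) (by simp)
    rw [fromGroups_cons] at h
    have : k = 0 := by
      by_contra hk0
      have : (List.replicate k c ++ fromGroups t).length = 0 := by rw [h]; rfl
      simp at this
      omega
    omega

theorem fromGroups_eq_hash (gs : List (Char × Nat)) (hc : gCounts gs) :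
    fromGroups gs = ['#'] ↔ gs = [('#', 1)] := by
  constructor
  · intro h
    cases gs with
    | nil => simp [fromGroups] at h
    | cons g t =>
      obtain ⟨c, k⟩ := g
      have hk := hc (c, k) (by simp)
      rw [fromGroups_cons] at h
      cases k with
      | zero => omega
      | succ k' =>
        rw [List.replicate_succ, List.cons_append] at h
        have hc1 : c = '#' := by exact (List.cons_eq_cons.mp h).1
        have htail : List.replicate k' c ++ fromGroups t = [] := (List.cons_eq_cons.mp h).2
        have hk0 : k' = 0 := by
          by_contra hk0
          have : (List.replicate k' c ++ fromGroups t).length = 0 := by rw [htail]; rfl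
          simp at this; omega
        subst hk0
        simp at htail
        have := fromGroups_eq_nil t (fun g hg => hc g (by simp [hg])) htail
        subst this; subst hc1; rfl
  · intro h; subst h; rfl

-- ---- indexing into a grouped string ----
theorem getA_append_right (l1 l2 : List Char) (o : Nat) :
    pvGetA (l1 ++ l2) (l1.length + o) = pvGetA l2 o := by
  simp only [pvGetA, List.getD_eq_getElem?_getD]
  rw [List.getElem?_append_right (Nat.le_add_right _ _)]
  simp

theorem getA_run (l1 : List Char) (k : Nat) (c : Char) (l2 : List Char) (o : Nat)
    (h : o < k) : pvGetA (l1 ++ (List.replicate k c ++ l2)) (l1.length + o) = c := by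
  rw [getA_append_right]
  simp only [pvGetA, List.getD_eq_getElem?_getD]
  rw [List.getElem?_append_left (by simpa using h)]
  simp [h]

theorem getA_head (l1 : List Char) (m : Nat) (e : Char) (l2 : List Char) (hm : 1 ≤ m) :
    pvGetA (l1 ++ (List.replicate m e ++ l2)) l1.length = e := by
  have := getA_run l1 m e l2 0 (by omega)
  simpa using this

-- ---- scanning a constant run with A's delete loop ----
theorem delAux_walk (s : List Char) (i k : Nat) (hk : i + k ≤ s.length)
    (hrun : ∀ t, i ≤ t → t < i + k → pvGetA s t = pvGetA s i) :
    ∀ d j, i ≤ j → j + d = i + k → delAuxA s i j = delAuxA s i (i + k) := by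
  intro d
  induction d with
  | zero =>
    intro j hij hjk
    have : j = i + k := by omega
    rw [this]
  | succ d ih =>
    intro j hij hjk
    have hj : j < s.length := by omega
    rw [delAuxA, dif_pos hj, if_pos ((hrun j hij (by omega)).symm)]
    exact ih (j + 1) (by omega) (by omega)

theorem delAux_selfstep (s : List Char) (j : Nat) (h : j < s.length) :
    delAuxA s j j = delAuxA s j (j + 1) := by
  rw [delAuxA, dif_pos h, if_pos rfl]

-- if no closed run has length ≥ 3, A's delete scan returns the board unchanged
theorem delAux_short : ∀ (todo done : List (Char × Nat)),
    gCounts (done ++ todo) → gAdj (done ++ todo) → NLS todo →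
    delAuxA (fromGroups (done ++ todo)) (fromGroups done).length (fromGroups done).length
      = fromGroups (done ++ todo) := by
  intro todo
  induction todo with
  | nil =>
    intro done _ _ _
    have hl : ¬ (fromGroups done).length < (fromGroups (done ++ [])).length := by simp
    rw [delAuxA, dif_neg hl]
  | cons g todo' ih =>
    intro done hc ha hn
    obtain ⟨ch, k⟩ := g
    set s := fromGroups (done ++ (ch, k) :: todo') with hs
    set i := (fromGroups done).length with hi
    have hsplit : s = fromGroups done ++ (List.replicate k ch ++ fromGroups todo') := by
      rw [hs, fromGroups_append, fromGroups_cons]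
    have hk1 : 1 ≤ k := hc (ch, k) (by simp)
    have hgi : pvGetA s i = ch := by
      rw [hi, hsplit]; exact getA_head _ k ch _ hk1
    have hrun : ∀ t, i ≤ t → t < i + k → pvGetA s t = pvGetA s i := by
      intro t h1 h2
      rw [hgi, hsplit]
      have ht : t = (fromGroups done).length + (t - i) := by omega
      rw [ht]
      exact getA_run _ k ch _ _ (by omega)
    have hlen : i + k ≤ s.length := by rw [hsplit]; simp; omega
    have hwalk := delAux_walk s i k hlen hrun k i (le_refl i) (by omega)
    cases todo' with
    | nil =>
      have hend : ¬ i + k < s.length := by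
        rw [hsplit]; simp [fromGroups_nil]; omega
      rw [hwalk, delAuxA, dif_neg hend]
    | cons g2 t2 =>
      obtain ⟨e, m⟩ := g2
      have hm1 : 1 ≤ m := hc (e, m) (by simp)
      have hsplit2 : s = (fromGroups done ++ List.replicate k ch) ++
          (List.replicate m e ++ fromGroups t2) := by
        rw [hs, fromGroups_append, fromGroups_cons, fromGroups_cons]; simp
      have hlen2 : (fromGroups done ++ List.replicate k ch).length = i + k := by
        simp; omega
      have hge : pvGetA s (i + k) = e := by
        rw [hsplit2, ← hlen2]; exact getA_head _ m e _ hm1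
      have hche : ch ≠ e := by
        have := (List.isChain_append.mp ha).2.1
        exact (List.isChain_cons_cons.mp this).1
      have hne : ¬ pvGetA s i = pvGetA s (i + k) := by rw [hgi, hge]; exact hche
      have hjlt : i + k < s.length := by rw [hsplit2]; simp; omega
      have hk3 : ¬ 3 ≤ (i + k) - i := by
        have := hn.1; simp at this; omega
      rw [hwalk, delAuxA, dif_pos hjlt, if_neg hne, if_neg hk3]
      rw [← delAux_selfstep s (i + k) hjlt]
      have hassoc : done ++ (ch, k) :: (e, m) :: t2 = (done ++ [(ch, k)]) ++ (e, m) :: t2 := by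
        simp
      have hi' : (fromGroups (done ++ [(ch, k)])).length = i + k := by
        rw [fromGroups_append, fromGroups_cons, fromGroups_nil]; simp; omega
      have hmain := ih (done ++ [(ch, k)]) (by rw [← hassoc]; exact hc)
        (by rw [gAdj, ← hassoc]; exact ha) hn.2
      rw [hi'] at hmain
      rw [hs, hassoc]
      exact hmain

-- at the first closed run of length ≥ 3, A's delete scan restarts on the shrunk board
theorem delAux_trig : ∀ (pre done : List (Char × Nat)) (c : Char) (k : Nat)
    (suf : List (Char × Nat)),
    gCounts (done ++ pre ++ (c, k) :: suf) → gAdj (done ++ pre ++ (c, k) :: suf) →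
    (∀ g ∈ pre, g.2 < 3) → 3 ≤ k → suf ≠ [] →
    delAuxA (fromGroups (done ++ pre ++ (c, k) :: suf)) (fromGroups done).length
        (fromGroups done).length
      = delAuxA (fromGroups (done ++ pre ++ suf)) 0 0 := by
  intro pre
  induction pre with
  | nil =>
    intro done c k suf hc ha hpre hk hsuf
    set s := fromGroups (done ++ [] ++ (c, k) :: suf) with hs
    set i := (fromGroups done).length with hi
    obtain ⟨⟨e, m⟩, t2, rfl⟩ : ∃ g t2, suf = g :: t2 := by
      cases suf with
      | nil => exact absurd rfl hsuf
      | cons g t => exact ⟨g, t, rfl⟩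
    have hsplit : s = fromGroups done ++ (List.replicate k c ++ fromGroups ((e, m) :: t2)) := by
      rw [hs, List.append_nil, fromGroups_append, fromGroups_cons]
    have hk1 : 1 ≤ k := by omega
    have hm1 : 1 ≤ m := hc (e, m) (by simp)
    have hgi : pvGetA s i = c := by rw [hi, hsplit]; exact getA_head _ k c _ hk1
    have hrun : ∀ t, i ≤ t → t < i + k → pvGetA s t = pvGetA s i := by
      intro t h1 h2
      rw [hgi, hsplit]
      have ht : t = (fromGroups done).length + (t - i) := by omega
      rw [ht]
      exact getA_run _ k c _ _ (by omega)
    have hlen : i + k ≤ s.length := by rw [hsplit]; simp; omega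
    have hwalk := delAux_walk s i k hlen hrun k i (le_refl i) (by omega)
    have hsplit2 : s = (fromGroups done ++ List.replicate k c) ++
        (List.replicate m e ++ fromGroups t2) := by
      rw [hsplit, fromGroups_cons]; simp
    have hlen2 : (fromGroups done ++ List.replicate k c).length = i + k := by simp; omega
    have hge : pvGetA s (i + k) = e := by
      rw [hsplit2, ← hlen2]; exact getA_head _ m e _ hm1
    have hce : c ≠ e := by
      have := (List.isChain_append.mp (by simpa using ha : gAdj (done ++ (c, k) :: (e, m) :: t2))).2.1
      exact (List.isChain_cons_cons.mp this).1
    have hne : ¬ pvGetA s i = pvGetA s (i + k) := by rw [hgi, hge]; exact hce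
    have hjlt : i + k < s.length := by rw [hsplit2]; simp; omega
    have hk3 : 3 ≤ (i + k) - i := by omega
    rw [hwalk, delAuxA, dif_pos hjlt, if_neg hne, if_pos hk3]
    have htake : s.take i = fromGroups done := by
      rw [hsplit, hi]; exact List.take_left
    have hdrop : s.drop (i + k) = List.replicate m e ++ fromGroups t2 := by
      rw [hsplit2, ← hlen2]; exact List.drop_left
    rw [htake, hdrop]
    have : fromGroups done ++ (List.replicate m e ++ fromGroups t2)
        = fromGroups (done ++ [] ++ (e, m) :: t2) := by
      rw [List.append_nil, fromGroups_append, fromGroups_cons]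
    rw [this]
  | cons g pre' ih =>
    intro done c k suf hc ha hpre hk hsuf
    obtain ⟨ch, k'⟩ := g
    set s := fromGroups (done ++ (ch, k') :: pre' ++ (c, k) :: suf) with hs
    set i := (fromGroups done).length with hi
    obtain ⟨⟨e, m⟩, t2, hrest⟩ : ∃ g t2, pre' ++ (c, k) :: suf = g :: t2 := by
      cases pre' with
      | nil => exact ⟨(c, k), suf, rfl⟩
      | cons g t => exact ⟨g, t ++ (c, k) :: suf, rfl⟩
    have hflat : done ++ (ch, k') :: pre' ++ (c, k) :: suf
        = done ++ (ch, k') :: (e, m) :: t2 := by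
      simp only [List.append_assoc, List.cons_append]
      rw [hrest]
    have hsplit : s = fromGroups done ++ (List.replicate k' ch ++ fromGroups ((e, m) :: t2)) := by
      rw [hs, hflat, fromGroups_append, fromGroups_cons]
    have hk1 : 1 ≤ k' := hc (ch, k') (by simp)
    have hm1 : 1 ≤ m := by
      refine hc (e, m) ?_
      rw [hflat]; simp
    have hgi : pvGetA s i = ch := by rw [hi, hsplit]; exact getA_head _ k' ch _ hk1
    have hrun : ∀ t, i ≤ t → t < i + k' → pvGetA s t = pvGetA s i := by
      intro t h1 h2
      rw [hgi, hsplit]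
      have ht : t = (fromGroups done).length + (t - i) := by omega
      rw [ht]
      exact getA_run _ k' ch _ _ (by omega)
    have hlen : i + k' ≤ s.length := by rw [hsplit]; simp; omega
    have hwalk := delAux_walk s i k' hlen hrun k' i (le_refl i) (by omega)
    have hsplit2 : s = (fromGroups done ++ List.replicate k' ch) ++
        (List.replicate m e ++ fromGroups t2) := by
      rw [hsplit, fromGroups_cons]; simp
    have hlen2 : (fromGroups done ++ List.replicate k' ch).length = i + k' := by simp; omega
    have hge : pvGetA s (i + k') = e := by
      rw [hsplit2, ← hlen2]; exact getA_head _ m e _ hm1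
    have hche : ch ≠ e := by
      have h1 : gAdj (done ++ (ch, k') :: (e, m) :: t2) := by
        rw [gAdj, ← hflat]; exact ha
      have := (List.isChain_append.mp h1).2.1
      exact (List.isChain_cons_cons.mp this).1
    have hne : ¬ pvGetA s i = pvGetA s (i + k') := by rw [hgi, hge]; exact hche
    have hjlt : i + k' < s.length := by rw [hsplit2]; simp; omega
    have hk3 : ¬ 3 ≤ (i + k') - i := by
      have := hpre (ch, k') (by simp); simp at this; omega
    rw [hwalk, delAuxA, dif_pos hjlt, if_neg hne, if_neg hk3]
    rw [← delAux_selfstep s (i + k') hjlt]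
    have hassoc : done ++ (ch, k') :: pre' ++ (c, k) :: suf
        = (done ++ [(ch, k')]) ++ pre' ++ (c, k) :: suf := by simp
    have hi' : (fromGroups (done ++ [(ch, k')])).length = i + k' := by
      rw [fromGroups_append, fromGroups_cons, fromGroups_nil]; simp; omega
    have hmain := ih (done ++ [(ch, k')]) c k suf
      (by rw [← hassoc]; exact hc) (by rw [gAdj, ← hassoc]; exact ha)
      (fun g hg => hpre g (List.mem_cons_of_mem _ hg)) hk hsuf
    rw [hi'] at hmain
    have hout : (done ++ [(ch, k')]) ++ pre' ++ suf = done ++ (ch, k') :: pre' ++ suf := by simp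
    rw [hout] at hmain
    rw [hs, hassoc]
    exact hmain

-- collapsing is invariant under A's leftmost deletion step (confluence)
theorem collapse_conf (pre : List (Char × Nat)) (c : Char) (k : Nat)
    (suf : List (Char × Nat))
    (hc : gCounts (pre ++ (c, k) :: suf)) (ha : gAdj (pre ++ (c, k) :: suf))
    (hpre : ∀ g ∈ pre, g.2 < 3) (hk : 3 ≤ k) (hsuf : suf ≠ []) :
    List.foldl stepB [] (fromGroups (pre ++ (c, k) :: suf))
      = List.foldl stepB [] (fromGroups (pre ++ suf)) := by
  have hfold_pre : List.foldl stepB [] (fromGroups pre) = pre := by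
    have := foldl_step_groups pre [] (fun g hg => hc g (by simp [hg]))
      (List.isChain_append.mp ha).1 (NLS_of_short pre hpre)
      (by intro c' k' _ e m h; simp at h)
    simpa using this
  have hjunc : ∀ e m, pre.getLast? = some (e, m) → e ≠ c := by
    intro e m hl
    have := (List.isChain_append.mp ha).2.2 (e, m) hl (c, k) rfl
    simpa using this
  have htop : TopOK pre c := by
    intro e m hl
    exact ⟨hpre (e, m) (List.mem_of_getLast? hl), hjunc e m hl⟩
  obtain ⟨⟨d, m⟩, t, rfl⟩ : ∃ g t, suf = g :: t := by
    cases suf with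
    | nil => exact absurd rfl hsuf
    | cons g t => exact ⟨g, t, rfl⟩
  have hm1 : 1 ≤ m := hc (d, m) (by simp)
  have hcd : c ≠ d := by
    have := (List.isChain_append.mp ha).2.1
    exact (List.isChain_cons_cons.mp this).1
  have hrepm : List.replicate m d = d :: List.replicate (m - 1) d := by
    rw [← List.replicate_succ]; congr 1; omega
  have hrepk : List.replicate k c = c :: List.replicate (k - 1) c := by
    rw [← List.replicate_succ]; congr 1; omega
  -- left side
  have hL : List.foldl stepB [] (fromGroups (pre ++ (c, k) :: (d, m) :: t))
      = List.foldl stepB (stepB pre d) (List.replicate (m - 1) d ++ fromGroups t) := by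
    rw [fromGroups_append, List.foldl_append, hfold_pre, fromGroups_cons, fromGroups_cons]
    rw [hrepk, List.cons_append, List.foldl_cons, stepB_push' pre c htop]
    rw [List.foldl_append, foldl_step_replicate]
    have h1k : 1 + (k - 1) = k := by omega
    rw [h1k, hrepm, List.cons_append, List.foldl_cons]
    rw [stepB_pop pre c k d hcd hk
      (fun e m' hl => hpre (e, m') (List.mem_of_getLast? hl))]
  have hR : List.foldl stepB [] (fromGroups (pre ++ (d, m) :: t))
      = List.foldl stepB (stepB pre d) (List.replicate (m - 1) d ++ fromGroups t) := by
    rw [fromGroups_append, List.foldl_append, hfold_pre, fromGroups_cons]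
    rw [hrepm, List.cons_append, List.foldl_cons]
  rw [hL, hR]

-- A's delete computes exactly what B's one-pass stack collapse computes
theorem delete_eq_collapse (s : List Char) : delAuxA s 0 0 = fromGroups (collapseB s) := by
  suffices H : ∀ n s, List.length s = n → delAuxA s 0 0 = fromGroups (collapseB s) by
    exact H s.length s rfl
  intro n
  induction n using Nat.strong_induction_on with
  | _ n ih =>
    intro s hlen
    have hfg := fromGroups_toGroups s
    rcases findTrigger (toGroups s) with hnls | ⟨pre, c, k, suf, hsplit, hsuf, hk, hpre⟩
    · have h1 : delAuxA s 0 0 = s := by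
        have := delAux_short (toGroups s) [] (by simpa using gCounts_toGroups s)
          (by rw [gAdj]; simpa using gAdj_toGroups s) hnls
        simpa [hfg, fromGroups_nil] using this
      have h2 : collapseB s = toGroups s := by
        unfold collapseB
        conv_lhs => rw [← hfg]
        rw [foldl_step_groups (toGroups s) [] (gCounts_toGroups s) (gAdj_toGroups s) hnls
          (by intro c' k' _ e m h; simp at h)]
        simp
      rw [h1, h2, hfg]
    · have hwfc : gCounts (pre ++ (c, k) :: suf) := by rw [← hsplit]; exact gCounts_toGroups s
      have hwfa : gAdj (pre ++ (c, k) :: suf) := by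
        rw [gAdj, ← hsplit]; exact gAdj_toGroups s
      have hs : s = fromGroups (pre ++ (c, k) :: suf) := by rw [← hsplit, hfg]
      have h1 : delAuxA s 0 0 = delAuxA (fromGroups (pre ++ suf)) 0 0 := by
        have := delAux_trig pre [] c k suf (by simpa using hwfc)
          (by rw [gAdj]; simpa using hwfa) hpre hk hsuf
        simp only [List.nil_append, fromGroups_nil, List.length_nil] at this
        rw [← hs] at this
        exact this
      have hlen2 : (fromGroups (pre ++ suf)).length < n := by
        subst hlen
        rw [hs]
        simp only [fromGroups_append, fromGroups_cons, List.length_append,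
          List.length_replicate]
        omega
      have hih := ih _ hlen2 (fromGroups (pre ++ suf)) rfl
      have h2 : collapseB s = collapseB (fromGroups (pre ++ suf)) := by
        unfold collapseB
        rw [hs]
        exact collapse_conf pre c k suf hwfc hwfa hpre hk hsuf
      rw [h1, hih, h2]

-- ---- the dfs loops ----
theorem dfsLoop_walk (f : Nat) (b : List Char) (i k : Nat) (c : PySem.Dict Char Int)
    (mc : Int) (hk : i + k ≤ b.length)
    (hrun : ∀ t, i ≤ t → t < i + k → pvGetA b t = pvGetA b i) :
    ∀ d j, i ≤ j → j + d = i + k → dfsLoopA f b i j c mc = dfsLoopA f b i (i + k) c mc := by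
  intro d
  induction d with
  | zero =>
    intro j hij hjk
    have : j = i + k := by omega
    rw [this]
  | succ d ih =>
    intro j hij hjk
    have hj : j < b.length := by omega
    rw [dfsLoopA, dif_pos hj, if_pos ((hrun j hij (by omega)).symm)]
    exact ih (j + 1) (by omega) (by omega)

theorem dfsLoop_selfstep (f : Nat) (b : List Char) (j : Nat) (c : PySem.Dict Char Int)
    (mc : Int) (h : j < b.length) :
    dfsLoopA f b j j c mc = dfsLoopA f b j (j + 1) c mc := by
  rw [dfsLoopA, dif_pos h, if_pos rfl]

theorem dfsLoopA_boundary (f : Nat) (b : List Char) (i j : Nat) (c : PySem.Dict Char Int)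
    (mc : Int) (hj : j < b.length) (hne : ¬ pvGetA b i = pvGetA b j) :
    dfsLoopA f b i j c mc =
      if 3 - ((j : Int) - (i : Int)) ≤ c.getD (pvGetA b i) 0 then
        dfsLoopA f b j (j + 1) c
          (min mc ((3 - ((j : Int) - (i : Int))) +
            dfsA f (b.take i ++ b.drop j)
              (c.insert (pvGetA b i)
                (c.getD (pvGetA b i) 0 - (3 - ((j : Int) - (i : Int)))))))
      else dfsLoopA f b j (j + 1) c mc := by
  rw [dfsLoopA, dif_pos hj, if_neg hne]

theorem dfsLoopB_nil (f : Nat) (done : List (Char × Nat)) (c : PySem.Dict Char Int)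
    (mc : Int) : dfsLoopB f done [] c mc = mc := by
  rw [dfsLoopB]

theorem dfsLoopB_single (f : Nat) (done : List (Char × Nat)) (g : Char × Nat)
    (c : PySem.Dict Char Int) (mc : Int) : dfsLoopB f done [g] c mc = mc := by
  rw [dfsLoopB]

theorem dfsLoopB_cons (f : Nat) (done : List (Char × Nat)) (ch : Char) (k : Nat)
    (g2 : Char × Nat) (rest : List (Char × Nat)) (c : PySem.Dict Char Int) (mc : Int) :
    dfsLoopB f done ((ch, k) :: g2 :: rest) c mc =
      if 3 - (k : Int) ≤ c.getD ch 0 then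
        dfsLoopB f (done ++ [(ch, k)]) (g2 :: rest) c
          (min mc ((3 - (k : Int)) +
            dfsB f (fromGroups (done ++ g2 :: rest))
              (c.insert ch (c.getD ch 0 - (3 - (k : Int))))))
      else dfsLoopB f (done ++ [(ch, k)]) (g2 :: rest) c mc := by
  rw [dfsLoopB]
  all_goals simp

-- A's index loop over the board = B's loop over its group list
theorem loop_corr (f : Nat) (hE : ∀ s c, dfsA f s c = dfsB f s c) :
    ∀ (todo done : List (Char × Nat)) (c : PySem.Dict Char Int) (mc : Int),
    gCounts (done ++ todo) → gAdj (done ++ todo) →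
    dfsLoopA f (fromGroups (done ++ todo)) (fromGroups done).length
        (fromGroups done).length c mc
      = dfsLoopB f done todo c mc := by
  intro todo
  induction todo with
  | nil =>
    intro done c mc _ _
    have hl : ¬ (fromGroups done).length < (fromGroups (done ++ [])).length := by simp
    rw [dfsLoopA, dif_neg hl, dfsLoopB_nil]
  | cons g todo' ih =>
    intro done c mc hc ha
    obtain ⟨ch, k⟩ := g
    set s := fromGroups (done ++ (ch, k) :: todo') with hs
    set i := (fromGroups done).length with hi
    have hsplit : s = fromGroups done ++ (List.replicate k ch ++ fromGroups todo') := by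
      rw [hs, fromGroups_append, fromGroups_cons]
    have hk1 : 1 ≤ k := hc (ch, k) (by simp)
    have hgi : pvGetA s i = ch := by rw [hi, hsplit]; exact getA_head _ k ch _ hk1
    have hrun : ∀ t, i ≤ t → t < i + k → pvGetA s t = pvGetA s i := by
      intro t h1 h2
      rw [hgi, hsplit]
      have ht : t = (fromGroups done).length + (t - i) := by omega
      rw [ht]
      exact getA_run _ k ch _ _ (by omega)
    have hlen : i + k ≤ s.length := by rw [hsplit]; simp; omega
    have hwalk := dfsLoop_walk f s i k c mc hlen hrun k i (le_refl i) (by omega)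
    cases todo' with
    | nil =>
      have hend : ¬ i + k < s.length := by
        rw [hsplit]; simp [fromGroups_nil]; omega
      rw [hwalk, dfsLoopA, dif_neg hend, dfsLoopB_single]
    | cons g2 t2 =>
      obtain ⟨e, m⟩ := g2
      have hm1 : 1 ≤ m := hc (e, m) (by simp)
      have hsplit2 : s = (fromGroups done ++ List.replicate k ch) ++
          (List.replicate m e ++ fromGroups t2) := by
        rw [hs, fromGroups_append, fromGroups_cons, fromGroups_cons]; simp
      have hlen2 : (fromGroups done ++ List.replicate k ch).length = i + k := by
        simp; omega
      have hge : pvGetA s (i + k) = e := by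
        rw [hsplit2, ← hlen2]; exact getA_head _ m e _ hm1
      have hche : ch ≠ e := by
        have := (List.isChain_append.mp ha).2.1
        exact (List.isChain_cons_cons.mp this).1
      have hne : ¬ pvGetA s i = pvGetA s (i + k) := by rw [hgi, hge]; exact hche
      have hjlt : i + k < s.length := by rw [hsplit2]; simp; omega
      have hcast : ((i + k : Nat) : Int) - (i : Int) = (k : Int) := by push_cast; ring
      have htake : s.take i = fromGroups done := by
        rw [hsplit, hi]; exact List.take_left
      have hdrop : s.drop (i + k) = fromGroups ((e, m) :: t2) := by
        rw [hsplit2, ← hlen2, List.drop_left, fromGroups_cons]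
      have harg : s.take i ++ s.drop (i + k) = fromGroups (done ++ (e, m) :: t2) := by
        rw [htake, hdrop, fromGroups_append]
      have hassoc : done ++ (ch, k) :: (e, m) :: t2 = (done ++ [(ch, k)]) ++ (e, m) :: t2 := by
        simp
      have hi' : (fromGroups (done ++ [(ch, k)])).length = i + k := by
        rw [fromGroups_append, fromGroups_cons, fromGroups_nil]; simp; omega
      have hcont : ∀ mc' : Int, dfsLoopA f s (i + k) (i + k + 1) c mc'
          = dfsLoopB f (done ++ [(ch, k)]) ((e, m) :: t2) c mc' := by
        intro mc'
        rw [← dfsLoop_selfstep f s (i + k) c mc' hjlt]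
        have hmain := ih (done ++ [(ch, k)]) c mc' (by rw [← hassoc]; exact hc)
          (by rw [gAdj, ← hassoc]; exact ha)
        rw [hi'] at hmain
        rw [hs, hassoc]
        exact hmain
      rw [hwalk, dfsLoopA_boundary f s i (i + k) c mc hjlt hne,
        dfsLoopB_cons f done ch k (e, m) t2 c mc]
      rw [hgi, hcast, harg, hE]
      by_cases hcond : 3 - (k : Int) ≤ c.getD ch 0
      · rw [if_pos hcond, if_pos hcond, hcont]
      · rw [if_neg hcond, if_neg hcond, hcont]

-- the two dfs functions agree at every fuel
theorem dfs_eq : ∀ (f : Nat) (s : List Char) (c : PySem.Dict Char Int),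
    dfsA f s c = dfsB f s c := by
  intro f
  induction f with
  | zero => intro s c; rw [dfsA, dfsB]
  | succ f ih =>
    intro s c
    have hb : delAuxA s 0 0 = fromGroups (collapseB s) := delete_eq_collapse s
    obtain ⟨hgc, hga⟩ := wf_collapse s
    rw [dfsA, dfsB]
    by_cases hst : collapseB s = [('#', 1)]
    · have hbh : delAuxA s 0 0 = ['#'] := by
        rw [hb]; exact (fromGroups_eq_hash _ hgc).mpr hst
      simp [hbh, hst]
    · have hbne : ¬ delAuxA s 0 0 = ['#'] := by
        rw [hb]
        intro h
        exact hst ((fromGroups_eq_hash _ hgc).mp h)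
      rw [if_neg hbne, if_neg hst]
      have hcorr := loop_corr f ih (collapseB s) [] c 6 (by simpa using hgc)
        (by rw [gAdj]; simpa using hga)
      simp only [List.nil_append, fromGroups_nil, List.length_nil] at hcorr
      rw [hb]
      exact hcorr

theorem findMinStep_spec : Claim_equal_findMinStep := by
  intro board hand _
  unfold Spec_findMinStep findMinStep findMinStep_alt
  simp only [dfs_eq]
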